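-- pv_equiv track=rewrite | github.com/Neha-Jacob-8/Sign-Language-to-Speech-Translator | server.py | assemble_text
-- ===== SOURCE A (Python) =====
-- from typing import List, Optional
--
-- def assemble_text(chars: List[str], gaps: List[bool], auto_space: bool) -> str:
--     if not chars: return ""
--     if auto_space: return " ".join(chars)
--     out = [chars[0]]
--     for i in range(len(chars)-1):
--         if i < len(gaps) and gaps[i]:
--             out.append(" ")
--         out.append(chars[i+1])
--     return "".join(out)
-- ===== SOURCE B (Python) =====
-- from typing import List
--
-- def assemble_text(chars: List[str], gaps: List[bool], auto_space: bool) -> str: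
--     if not chars:
--         return ""
--     if auto_space:
--         return " ".join(chars)
--     # partition at gap boundaries into word segments, then join with single spaces
--     words = []
--     cur = chars[0]
--     g = iter(gaps)
--     for ch in chars[1:]:
--         if next(g, False):
--             words.append(cur)
--             cur = ch
--         else:
--             cur += ch
--     words.append(cur)
--     return " ".join(words)
-- ===== Notes on version B (the rewrite author's own statement) =====
-- stated objective: alternative
-- what changed: Instead of A's index loop that appends chars and explicit space strings into one flat list and joins on the empty string, B partitions the character sequence at gap boundaries into word segments (iterating the chars structurally with an iterator over gaps) and joins the word list with a single space.
import Mathlib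
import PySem

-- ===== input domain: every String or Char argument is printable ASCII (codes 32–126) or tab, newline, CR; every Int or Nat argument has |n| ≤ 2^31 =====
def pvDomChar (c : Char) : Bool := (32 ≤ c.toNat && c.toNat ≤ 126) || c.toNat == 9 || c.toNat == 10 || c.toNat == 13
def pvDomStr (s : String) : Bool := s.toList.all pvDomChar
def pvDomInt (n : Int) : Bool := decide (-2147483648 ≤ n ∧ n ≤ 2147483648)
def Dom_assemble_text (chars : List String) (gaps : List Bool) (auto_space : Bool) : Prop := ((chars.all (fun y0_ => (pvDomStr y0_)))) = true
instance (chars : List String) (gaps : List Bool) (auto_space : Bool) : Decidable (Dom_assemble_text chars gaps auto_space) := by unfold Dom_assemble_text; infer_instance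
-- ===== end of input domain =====

-- B rebuilds the text by splitting the chars at gap boundaries into word segments and
-- joining them with " ", instead of A's flat index loop that interleaves space strings;
-- same output (objective: alternative decomposition, same cost).

-- ===== PORT A =====
-- loop body of A's 'for i in range(len(chars)-1)': both appends of one iteration
-- (chars[i+1] and gaps[i] are in range whenever accessed, so getD with a default is exact)
def stepA (chars : List String) (gaps : List Bool) (out : List String) (i : Int) : List String :=
  (if i < (gaps.length : Int) ∧ PySem.List.pyGetD gaps i false then out ++ [" "] else out)
    ++ [PySem.List.pyGetD chars (i + 1) ""]

def assemble_text (chars : List String) (gaps : List Bool) (auto_space : Bool) : String :=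
  match chars with
  | [] => ""
  | c :: _ =>
    if auto_space then PySem.Str.join " " chars
    else
      PySem.Str.join ""
        ((PySem.List.pyRange 0 ((chars.length : Int) - 1) 1).foldl (stepA chars gaps) [c])

-- ===== PORT B =====
-- B's loop: walk the remaining chars with the gaps iterator (missing gaps read as no gap),
-- starting a new word at each true gap, extending the current word otherwise.
def altWords : List String → List Bool → List String → String → List String
  | [], _, words, cur => words ++ [cur]
  | ch :: rs, [], words, cur => altWords rs [] words (cur ++ ch)
  | ch :: rs, g :: gs, words, cur =>
    if g then altWords rs gs (words ++ [cur]) ch else altWords rs gs words (cur ++ ch)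

def assemble_text_alt (chars : List String) (gaps : List Bool) (auto_space : Bool) : String :=
  match chars with
  | [] => ""
  | c :: rest =>
    if auto_space then PySem.Str.join " " chars
    else PySem.Str.join " " (altWords rest gaps [] c)

-- ===== PRECONDITION & SPEC =====
def Spec_assemble_text (chars : List String) (gaps : List Bool) (auto_space : Bool) (out : String) : Prop := out = assemble_text_alt chars gaps auto_space
instance (chars : List String) (gaps : List Bool) (auto_space : Bool) (out : String) : Decidable (Spec_assemble_text chars gaps auto_space out) := by unfold Spec_assemble_text; infer_instance

-- ===== CLAIM (what is proved, stated in full; the proofs are below) =====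
def Claim_equal_assemble_text : Prop := ∀ (chars : List String) (gaps : List Bool) (auto_space : Bool), Dom_assemble_text chars gaps auto_space → Spec_assemble_text chars gaps auto_space (assemble_text chars gaps auto_space)

-- ===== LEMMAS AND PROOFS =====

-- the list A's loop has built: chars after the first, each preceded by " " when its gap flag is set
def weave : List String → List Bool → List String
  | [], _ => []
  | ch :: cs, [] => ch :: weave cs []
  | ch :: cs, g :: gs => (if g then [" "] else []) ++ ch :: weave cs gs

theorem join_snoc (sep : List Char) (ps : List (List Char)) (q : List Char) :
    PySem.Chars.join sep (ps ++ [q])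
      = PySem.Chars.join sep ps ++ (if ps = [] then [] else sep) ++ q := by
  induction ps with
  | nil => simp [PySem.Chars.join_nil, PySem.Chars.join_singleton]
  | cons p ps ih =>
    cases ps with
    | nil => simp [PySem.Chars.join_cons_cons, PySem.Chars.join_singleton]
    | cons p2 ps2 =>
      rw [show (p :: p2 :: ps2) ++ [q] = p :: ((p2 :: ps2) ++ [q]) from rfl]
      rw [show (p2 :: ps2) ++ [q] = p2 :: (ps2 ++ [q]) from rfl]
      rw [PySem.Chars.join_cons_cons, PySem.Chars.join_cons_cons]
      rw [show p2 :: (ps2 ++ [q]) = (p2 :: ps2) ++ [q] from rfl, ih]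
      simp

theorem join_empty_sep (ps : List (List Char)) : PySem.Chars.join [] ps = ps.flatten := by
  induction ps with
  | nil => simp [PySem.Chars.join_nil]
  | cons p ps ih =>
    cases ps with
    | nil => simp [PySem.Chars.join_singleton]
    | cons p2 ps2 => rw [PySem.Chars.join_cons_cons]; simp [ih]

theorem foldA_eq (full : List String) (gaps : List Bool) :
    ∀ (cs : List String) (gs : List Bool) (k : Nat) (acc : List String),
      full.drop (k + 1) = cs → gaps.drop k = gs →
      (PySem.List.pyRange (k : Int) ((full.length : Int) - 1) 1).foldl (stepA full gaps) acc
        = acc ++ weave cs gs := by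
  intro cs
  induction cs with
  | nil =>
    intro gs k acc hfull _
    have hlen : full.length ≤ k + 1 := by
      have := congrArg List.length hfull; simp at this; omega
    rw [PySem.List.pyRange_one_eq_nil (by push_cast; omega)]
    simp [weave]
  | cons ch cs ih =>
    intro gs k acc hfull hgaps
    have hlen : k + 1 < full.length := by
      have := congrArg List.length hfull; simp at this; omega
    have hget : PySem.List.pyGetD full ((k : Int) + 1) "" = ch := by
      have h0 : full[k + 1]? = some ch := by
        have h := congrArg (fun l => l[0]?) hfull
        simpa [List.getElem?_drop] using h
      have : PySem.List.pyGetD full (((k + 1 : Nat) : Int)) "" = full.getD (k + 1) "" :=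
        PySem.List.pyGetD_natCast ..
      rw [show ((k : Int) + 1) = (((k + 1 : Nat)) : Int) by push_cast; ring, this,
        List.getD_eq_getElem?_getD, h0]
      rfl
    have hfull' : full.drop (k + 1 + 1) = cs := by
      have : full.drop (k + 1 + 1) = (full.drop (k + 1)).drop 1 := by
        rw [List.drop_drop]
      rw [this, hfull]; rfl
    rw [PySem.List.pyRange_one_cons (by push_cast; omega), List.foldl_cons]
    cases gs with
    | nil =>
      have hglen : gaps.length ≤ k := by
        have := congrArg List.length hgaps; simp at this; omega
      have hgaps' : gaps.drop (k + 1) = [] := by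
        rw [List.drop_eq_nil_iff]; omega
      have hstep : stepA full gaps acc (k : Int) = acc ++ [ch] := by
        unfold stepA
        rw [if_neg (by push_cast; omega), hget]
      rw [hstep, show ((k : Int) + 1) = (((k + 1 : Nat)) : Int) by push_cast; ring,
        ih [] (k + 1) (acc ++ [ch]) hfull' hgaps']
      simp [weave]
    | cons g gs' =>
      have hglen : k < gaps.length := by
        have := congrArg List.length hgaps; simp at this; omega
      have hgget : PySem.List.pyGetD gaps (k : Int) false = g := by
        have h0 : gaps[k]? = some g := by
          have h := congrArg (fun l => l[0]?) hgaps
          simpa [List.getElem?_drop] using h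
        rw [PySem.List.pyGetD_natCast, List.getD_eq_getElem?_getD, h0]
        rfl
      have hgaps' : gaps.drop (k + 1) = gs' := by
        have h2 := congrArg (List.drop 1) hgaps
        rw [List.drop_drop] at h2
        simpa [Nat.add_comm] using h2
      have hkint : (k : Int) < (gaps.length : Int) := by push_cast; omega
      have hstep : stepA full gaps acc (k : Int)
          = (if g then acc ++ [" "] else acc) ++ [ch] := by
        unfold stepA
        rw [hget, hgget]
        cases g <;> simp [hkint]
      rw [hstep, show ((k : Int) + 1) = (((k + 1 : Nat)) : Int) by push_cast; ring,
        ih gs' (k + 1) _ hfull' hgaps']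
      cases g <;> simp [weave]

theorem altWords_join : ∀ (cs : List String) (gs : List Bool) (words : List String) (cur : String),
    PySem.Chars.join [' '] ((altWords cs gs words cur).map String.toList)
      = PySem.Chars.join [' '] (words.map String.toList)
        ++ (if words = [] then [] else [' '])
        ++ cur.toList ++ ((weave cs gs).map String.toList).flatten := by
  intro cs
  induction cs with
  | nil =>
    intro gs words cur
    simp [altWords, weave, join_snoc]
  | cons ch cs ih =>
    intro gs words cur
    cases gs with
    | nil =>
      rw [show altWords (ch :: cs) [] words cur = altWords cs [] words (cur ++ ch) from rfl]
      rw [ih [] words (cur ++ ch)]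
      simp [weave]
    | cons g gs' =>
      cases g with
      | false =>
        rw [show altWords (ch :: cs) (false :: gs') words cur
            = altWords cs gs' words (cur ++ ch) from rfl]
        rw [ih gs' words (cur ++ ch)]
        simp [weave]
      | true =>
        rw [show altWords (ch :: cs) (true :: gs') words cur
            = altWords cs gs' (words ++ [cur]) ch from rfl]
        rw [ih gs' (words ++ [cur]) ch,
          show (words ++ [cur]).map String.toList
              = words.map String.toList ++ [cur.toList] from by simp,
          join_snoc]
        simp [weave]

-- ===== VERDICT (by name: the statement is the Claim_ definition above) =====
theorem assemble_text_spec : Claim_equal_assemble_text := by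
  intro chars gaps auto_space _
  unfold Spec_assemble_text
  cases chars with
  | nil => rfl
  | cons c rest =>
    cases auto_space with
    | true => rfl
    | false =>
      show PySem.Str.join ""
          ((PySem.List.pyRange 0 (((c :: rest).length : Int) - 1) 1).foldl
            (stepA (c :: rest) gaps) [c])
        = PySem.Str.join " " (altWords rest gaps [] c)
      rw [show (0 : Int) = ((0 : Nat) : Int) from rfl,
        foldA_eq (c :: rest) gaps rest gaps 0 [c] rfl rfl]
      apply congrArg String.ofList
      rw [show ("" : String).toList = ([] : List Char) from rfl,
        show (" " : String).toList = [' '] from rfl]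
      rw [join_empty_sep, altWords_join rest gaps [] c]
      simp [PySem.Chars.join_nil]
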